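-- pv_equiv track=rewrite | github.com/taha-kahya/mcp-security-proxy | mcp_security_tester/static_analyzer/detectors.py | _max_consecutive_char
-- ===== SOURCE A (Python) =====
-- def _max_consecutive_char(text: str, char: str) -> int:
--     max_run = current = 0
--     for c in text:
--         if c == char:
--             current += 1
--             max_run = max(max_run, current)
--         else:
--             current = 0
--     return max_run
-- ===== SOURCE B (Python) =====
-- def _max_consecutive_char(text: str, char: str) -> int:
--     # Run segmentation: scan maximal runs of equal characters, keep the
--     # longest run whose character is `char`.
--     best = 0
--     i = 0
--     n = len(text)
--     while i < n:
--         j = i + 1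
--         while j < n and text[j] == text[i]:
--             j += 1
--         if text[i] == char:
--             best = max(best, j - i)
--         i = j
--     return best
-- ===== Notes on version B (the rewrite author's own statement) =====
-- stated objective: alternative
-- what changed: B segments the string into maximal runs of equal characters (inner scan finds each run's end) and takes the longest run matching char, instead of A's flat loop with a running counter and max update per character.
import Mathlib
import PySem

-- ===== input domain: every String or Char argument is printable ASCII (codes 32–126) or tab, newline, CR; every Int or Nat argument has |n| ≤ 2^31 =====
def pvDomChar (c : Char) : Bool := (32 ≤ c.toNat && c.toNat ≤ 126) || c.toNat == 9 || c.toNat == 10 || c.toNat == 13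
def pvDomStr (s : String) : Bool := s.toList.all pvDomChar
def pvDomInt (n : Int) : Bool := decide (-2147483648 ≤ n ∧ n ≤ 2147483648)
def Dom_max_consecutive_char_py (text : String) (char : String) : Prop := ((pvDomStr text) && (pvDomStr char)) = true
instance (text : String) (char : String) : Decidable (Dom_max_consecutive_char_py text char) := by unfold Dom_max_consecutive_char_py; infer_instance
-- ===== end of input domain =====

-- B replaces A's flat running-counter loop by run segmentation (scan each maximal
-- run of equal characters, keep the longest run matching char); alternative, same cost.

-- ===== PORT A =====
-- one step of A's loop body; state = (max_run, current)
def pvStepA (char : String) (s : Int × Int) (c : Char) : Int × Int :=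
  if char.toList = [c] then (max s.1 (s.2 + 1), s.2 + 1) else (s.1, 0)

def max_consecutive_char_py (text : String) (char : String) : Int :=
  (text.toList.foldl (pvStepA char) (0, 0)).1

-- ===== PORT B =====
-- Source B's outer while loop: take the current maximal run (inner while = span),
-- update best if its character matches char, continue after the run.
def pvAltGo (char : String) (l : List Char) (best : Int) : Int :=
  match l with
  | [] => best
  | c :: cs =>
    let p := cs.span (· == c)
    pvAltGo char p.2 (if char.toList = [c] then max best ((p.1.length : Int) + 1) else best)
termination_by l.length
decreasing_by
  simp [List.span_eq_takeWhile_dropWhile]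
  exact List.length_dropWhile_le _ _

def max_consecutive_char_py_alt (text : String) (char : String) : Int :=
  pvAltGo char text.toList 0

-- ===== PRECONDITION & SPEC =====
def Spec_max_consecutive_char_py (text : String) (char : String) (out : Int) : Prop := out = max_consecutive_char_py_alt text char
instance (text : String) (char : String) (out : Int) : Decidable (Spec_max_consecutive_char_py text char out) := by unfold Spec_max_consecutive_char_py; infer_instance

-- ===== CLAIM (what is proved, stated in full; the proofs are below) =====
def Claim_equal_max_consecutive_char_py : Prop := ∀ (text : String) (char : String), Dom_max_consecutive_char_py text char → Spec_max_consecutive_char_py text char (max_consecutive_char_py text char)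

-- ===== LEMMAS AND PROOFS =====

-- A's loop over a matching run of n equal characters: current climbs to cur+n,
-- max_run absorbs the peak.
theorem pvFoldA_replicate_match (char : String) (c : Char) (h : char.toList = [c]) :
    ∀ (n : ℕ) (m cur : Int),
      List.foldl (pvStepA char) (m, cur) (List.replicate (n + 1) c)
        = (max m (cur + (n + 1)), cur + (n + 1)) := by
  intro n
  induction n with
  | zero => intro m cur; simp [pvStepA, h]
  | succ k ih =>
    intro m cur
    rw [List.replicate_succ, List.foldl_cons]
    have hstep : pvStepA char (m, cur) c = (max m (cur + 1), cur + 1) := by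
      simp [pvStepA, h]
    rw [hstep, ih]
    rw [Prod.mk.injEq]
    constructor
    · rcases le_total m (cur + 1) with h1 | h1 <;>
      rcases le_total m (cur + (↑k + 1 + 1)) with h2 | h2 <;>
      simp [max_def] <;> split_ifs <;> omega
    · push_cast; ring

-- A's loop over characters that never match char leaves max_run alone and
-- resets current to 0 (for nonempty lists).
theorem pvFoldA_no_match (char : String) :
    ∀ (l : List Char), (∀ x ∈ l, char.toList ≠ [x]) →
      ∀ (m cur : Int), List.foldl (pvStepA char) (m, cur) l = (m, if l = [] then cur else 0) := by
  intro l
  induction l with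
  | nil => intro _ m cur; simp
  | cons c cs ih =>
    intro hl m cur
    rw [List.foldl_cons]
    have hc : char.toList ≠ [c] := hl c (by simp)
    simp only [pvStepA, if_neg hc]
    rw [ih (fun x hx => hl x (by simp [hx])) m 0]
    split <;> simp

-- if the head of l does not match char, A's initial `current` is irrelevant
theorem pvFoldA_cur_irrelevant (char : String) (c : Char) (cs : List Char)
    (h : char.toList ≠ [c]) (m cur cur' : Int) :
    List.foldl (pvStepA char) (m, cur) (c :: cs) = List.foldl (pvStepA char) (m, cur') (c :: cs) := by
  simp [List.foldl_cons, pvStepA, if_neg h]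

theorem pvHead_dropWhile {p : Char → Bool} :
    ∀ (l : List Char) (c : Char) (cs : List Char), l.dropWhile p = c :: cs → p c = false := by
  intro l
  induction l with
  | nil => intro c cs h; simp at h
  | cons a as ih =>
    intro c cs h
    rw [List.dropWhile_cons] at h
    split at h
    · exact ih _ _ h
    · cases h; simpa using ‹¬ p a = true›

-- main invariant: starting with current = 0 and any max_run m, A's flat loop
-- computes exactly B's run-segmented recursion.
theorem pvMain (char : String) :
    ∀ (l : List Char) (m : Int),
      (List.foldl (pvStepA char) (m, 0) l).1 = pvAltGo char l m := by
  have key : ∀ (n : ℕ) (l : List Char), l.length ≤ n → ∀ (m : Int),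
      (List.foldl (pvStepA char) (m, 0) l).1 = pvAltGo char l m := by
    intro n
    induction n with
    | zero =>
      intro l hl m
      have : l = [] := List.eq_nil_of_length_eq_zero (Nat.le_zero.mp hl)
      rw [this, pvAltGo]
      simp
    | succ k ihn =>
      intro l hl m
      match l with
      | [] => rw [pvAltGo]; simp
      | c :: cs =>
        rcases hp : cs.span (· == c) with ⟨p1, p2⟩
        set p : List Char × List Char := (p1, p2) with hpdef
        have hgoalB : pvAltGo char (c :: cs) m
            = pvAltGo char p.2 (if char.toList = [c] then max m ((p.1.length : Int) + 1) else m) := by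
          rw [pvAltGo]
          simp only [hp]
        rw [hgoalB]
        have hspan := List.span_eq_takeWhile_dropWhile (· == c) cs
        rw [hp] at hspan
        have hpre : p.1 = cs.takeWhile (· == c) := congrArg Prod.fst hspan
        have hrest : p.2 = cs.dropWhile (· == c) := congrArg Prod.snd hspan
        have ih : ∀ (m' : Int), (List.foldl (pvStepA char) (m', 0) p.2).1 = pvAltGo char p.2 m' := by
          intro m'
          apply ihn
          have h1 : p.2.length ≤ cs.length := by
            rw [hrest]; exact List.length_dropWhile_le _ _
          simp at hl
          omega
        have hcs : cs = p.1 ++ p.2 := by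
          rw [hpre, hrest, List.takeWhile_append_dropWhile]
        have hall : ∀ x ∈ p.1, x = c := by
          intro x hx
          have := List.mem_takeWhile_imp (hpre ▸ hx)
          simpa using this
        have hrep : p.1 = List.replicate p.1.length c := List.eq_replicate_of_mem hall
        by_cases hm : char.toList = [c]
        · -- matching run of length p.1.length + 1
          have h1 : List.foldl (pvStepA char) (m, 0) (c :: cs)
              = List.foldl (pvStepA char) (max m ((p.1.length : Int) + 1), (p.1.length : Int) + 1) p.2 := by
            conv_lhs => rw [hcs, ← List.cons_append]
            rw [List.foldl_append]
            have hc : (c :: p.1) = List.replicate (p.1.length + 1) c := by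
              rw [List.replicate_succ]; exact congrArg _ hrep
            rw [hc, pvFoldA_replicate_match char c hm p.1.length m 0]
            norm_num
          rw [h1, if_pos hm]
          rcases hrest2 : p.2 with _ | ⟨d, ds⟩
          · rw [pvAltGo]; simp
          · have hd : (d == c) = false := pvHead_dropWhile cs d ds (by rw [← hrest]; exact hrest2)
            have hdm : char.toList ≠ [d] := by
              intro hdm
              have h3 : d = c := by
                have h2 : ([c] : List Char) = [d] := hm.symm.trans hdm
                simpa using h2.symm
              simp [h3] at hd
            rw [pvFoldA_cur_irrelevant char d ds hdm (max m ((p.1.length : Int) + 1))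
                ((p.1.length : Int) + 1) 0]
            have hih := ih (max m ((p.1.length : Int) + 1))
            rw [hrest2] at hih
            exact hih
        · -- non-matching run: every character of it equals c, so none matches char
          have h1 : List.foldl (pvStepA char) (m, 0) (c :: cs)
              = List.foldl (pvStepA char) (m, 0) p.2 := by
            conv_lhs => rw [hcs, ← List.cons_append]
            rw [List.foldl_append, pvFoldA_no_match char (c :: p.1)
              (by intro x hx; rcases List.mem_cons.mp hx with h | h
                  · rw [h]; exact hm
                  · rw [hall x h]; exact hm) m 0]
            split <;> rfl
          rw [h1, if_neg hm]
          exact ih _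
  intro l m
  exact key l.length l le_rfl m

-- ===== VERDICT (by name: the statement is the Claim_ definition above) =====
theorem max_consecutive_char_py_spec : Claim_equal_max_consecutive_char_py := by
  intro text char _
  unfold Spec_max_consecutive_char_py max_consecutive_char_py max_consecutive_char_py_alt
  exact pvMain char text.toList 0
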